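-- pv_equiv track=rewrite | github.com/WarLikeLaux/smart-multi-timer | src/tabs/calorie_storage.py | _calculate_macros
-- ===== SOURCE A (Python) =====
-- from typing import Dict, List, Optional
--
-- def _calculate_macros(entries: List[dict]) -> Dict[str, Optional[int]]:
--     """Вычисляет суммарные БЖУ для списка записей"""
--     totals = {"protein": 0, "fat": 0, "carbs": 0}
--     has_data = {"protein": False, "fat": False, "carbs": False}
--
--     for entry in entries:
--         for macro in ["protein", "fat", "carbs"]:
--             if entry.get(macro) is not None:
--                 totals[macro] += entry[macro]
--                 has_data[macro] = True
--
--     return {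
--         macro: totals[macro] if has_data[macro] else None
--         for macro in ["protein", "fat", "carbs"]
--     }
-- ===== SOURCE B (Python) =====
-- from typing import Dict, List, Optional
--
--
-- def _calculate_macros(entries: List[dict]) -> Dict[str, Optional[int]]:
--     """Divide-and-conquer over entries with an Option-sum merge:
--     each entry becomes a (protein, fat, carbs) triple of Optional ints,
--     and triples are combined pairwise (None is the identity, otherwise add)."""
--     keys = ("protein", "fat", "carbs")
--
--     def triple(e):
--         return tuple(e.get(m) for m in keys)
--
--     def merge(x, y):
--         return tuple(b if a is None else a if b is None else a + b
--                      for a, b in zip(x, y))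
--
--     def reduce(lo, hi):
--         if hi - lo == 1:
--             return triple(entries[lo])
--         mid = (lo + hi) // 2
--         return merge(reduce(lo, mid), reduce(mid, hi))
--
--     t = (None, None, None) if not entries else reduce(0, len(entries))
--     return dict(zip(keys, t))
-- ===== Notes on version B (the rewrite author's own statement) =====
-- stated objective: alternative
-- what changed: Replaces A's fused accumulator pass with totals/has_data dicts by a divide-and-conquer reduction: each entry is mapped to a triple of Optional ints and triples are merged pairwise with an Option-sum operation whose identity None doubles as the no-data signal.
import Mathlib
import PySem

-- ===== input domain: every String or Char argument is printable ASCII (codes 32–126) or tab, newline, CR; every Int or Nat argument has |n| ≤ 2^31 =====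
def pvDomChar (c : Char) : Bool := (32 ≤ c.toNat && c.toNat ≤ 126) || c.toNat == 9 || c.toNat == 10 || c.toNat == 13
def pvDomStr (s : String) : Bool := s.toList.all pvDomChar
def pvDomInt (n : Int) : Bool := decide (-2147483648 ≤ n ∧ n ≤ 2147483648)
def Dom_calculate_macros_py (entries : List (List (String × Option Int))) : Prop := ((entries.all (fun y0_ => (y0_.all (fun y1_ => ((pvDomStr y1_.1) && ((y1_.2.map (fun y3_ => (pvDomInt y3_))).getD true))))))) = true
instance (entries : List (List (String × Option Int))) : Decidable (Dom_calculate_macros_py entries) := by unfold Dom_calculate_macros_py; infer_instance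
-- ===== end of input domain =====

-- B replaces A's fused accumulator pass (totals dict + has_data flags) by a
-- divide-and-conquer reduction over Optional-int triples, where None is the
-- merge identity and doubles as the no-data signal: an alternative decomposition.

-- entry.get(macro): first-match association lookup; missing key and value None both give none
def pvGetMacro (entry : List (String × Option Int)) (m : String) : Option Int :=
  ((PySem.Dict.mk entry).get? m).join

-- ===== PORT A =====
-- body of the inner `for macro in [...]` loop, acting on (totals, has_data)
def pvStepA (st : PySem.Dict String Int × PySem.Dict String Bool)
    (entry : List (String × Option Int)) (m : String) :
    PySem.Dict String Int × PySem.Dict String Bool :=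
  match pvGetMacro entry m with
  | some v => (st.1.insert m (st.1.getD m 0 + v), st.2.insert m true)
  | none => st

def calculate_macros_py (entries : List (List (String × Option Int))) : List (String × Option Int) :=
  let totals0 : PySem.Dict String Int := PySem.Dict.ofList [("protein", 0), ("fat", 0), ("carbs", 0)]
  let has0 : PySem.Dict String Bool := PySem.Dict.ofList [("protein", false), ("fat", false), ("carbs", false)]
  let final := entries.foldl (fun st entry =>
    ["protein", "fat", "carbs"].foldl (fun st m => pvStepA st entry m) st) (totals0, has0)
  ["protein", "fat", "carbs"].map (fun m =>
    (m, if final.2.getD m false then some (final.1.getD m 0) else none))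

-- ===== PORT B =====
-- Source B's triple(e): the entry as an Optional-int triple (protein, fat, carbs)
def pvTriple (e : List (String × Option Int)) : Option Int × Option Int × Option Int :=
  (pvGetMacro e "protein", pvGetMacro e "fat", pvGetMacro e "carbs")

-- componentwise Option addition: 'b if a is None else a if b is None else a + b'
def pvOptAdd (a b : Option Int) : Option Int :=
  match a, b with
  | none, b => b
  | a, none => a
  | some x, some y => some (x + y)

def pvMerge (x y : Option Int × Option Int × Option Int) :
    Option Int × Option Int × Option Int :=
  (pvOptAdd x.1 y.1, pvOptAdd x.2.1 y.2.1, pvOptAdd x.2.2 y.2.2)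

-- Source B's reduce(lo, hi); the fuel argument only makes the recursion total
-- (every Python call has lo < hi, where hi - lo bounds the recursion depth)
def pvReduce (entries : List (List (String × Option Int))) (fuel lo hi : Nat) :
    Option Int × Option Int × Option Int :=
  match fuel with
  | 0 => (none, none, none)
  | fuel + 1 =>
    if hi - lo = 1 then pvTriple (entries.getD lo [])
    else
      let mid := (lo + hi) / 2
      pvMerge (pvReduce entries fuel lo mid) (pvReduce entries fuel mid hi)

def calculate_macros_py_alt (entries : List (List (String × Option Int))) : List (String × Option Int) :=
  let t := if entries.isEmpty then (none, none, none)
           else pvReduce entries entries.length 0 entries.length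
  [("protein", t.1), ("fat", t.2.1), ("carbs", t.2.2)]

-- ===== PRECONDITION & SPEC =====
def Spec_calculate_macros_py (entries : List (List (String × Option Int))) (out : List (String × Option Int)) : Prop := out = calculate_macros_py_alt entries
instance (entries : List (List (String × Option Int))) (out : List (String × Option Int)) : Decidable (Spec_calculate_macros_py entries out) := by unfold Spec_calculate_macros_py; infer_instance

-- ===== CLAIM (what is proved, stated in full; the proofs are below) =====
def Claim_equal_calculate_macros_py : Prop := ∀ (entries : List (List (String × Option Int))), Dom_calculate_macros_py entries → Spec_calculate_macros_py entries (calculate_macros_py entries)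

-- ===== LEMMAS AND PROOFS =====

-- common reference value: per-macro sum of the non-None values, none if there are none
def pvSpecF (entries : List (List (String × Option Int))) (m : String) : Option Int :=
  let values := entries.filterMap (fun e => pvGetMacro e m)
  if values = [] then none else some (values.foldl (· + ·) 0)

----------------------------------------------------------------- A-side lemmas

def pvEntryStep (st : PySem.Dict String Int × PySem.Dict String Bool)
    (entry : List (String × Option Int)) :
    PySem.Dict String Int × PySem.Dict String Bool :=
  ["protein", "fat", "carbs"].foldl (fun st m => pvStepA st entry m) st

theorem pvEntryStep_totals (st : PySem.Dict String Int × PySem.Dict String Bool)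
    (entry : List (String × Option Int)) (m : String)
    (hm : m = "protein" ∨ m = "fat" ∨ m = "carbs") :
    (pvEntryStep st entry).1.getD m 0 = st.1.getD m 0 + (pvGetMacro entry m).getD 0 := by
  simp only [pvEntryStep, List.foldl, pvStepA]
  rcases hm with rfl | rfl | rfl <;>
    cases hp : pvGetMacro entry "protein" <;>
    cases hf : pvGetMacro entry "fat" <;>
    cases hc : pvGetMacro entry "carbs" <;>
    simp [PySem.Dict.getD_insert]

theorem pvEntryStep_has (st : PySem.Dict String Int × PySem.Dict String Bool)
    (entry : List (String × Option Int)) (m : String)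
    (hm : m = "protein" ∨ m = "fat" ∨ m = "carbs") :
    (pvEntryStep st entry).2.getD m false = (st.2.getD m false || (pvGetMacro entry m).isSome) := by
  simp only [pvEntryStep, List.foldl, pvStepA]
  rcases hm with rfl | rfl | rfl <;>
    cases hp : pvGetMacro entry "protein" <;>
    cases hf : pvGetMacro entry "fat" <;>
    cases hc : pvGetMacro entry "carbs" <;>
    simp [PySem.Dict.getD_insert]

theorem pvFold_invariant (entries : List (List (String × Option Int)))
    (st : PySem.Dict String Int × PySem.Dict String Bool) (m : String)
    (hm : m = "protein" ∨ m = "fat" ∨ m = "carbs") :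
    (entries.foldl pvEntryStep st).1.getD m 0
        = (entries.filterMap (fun e => pvGetMacro e m)).foldl (· + ·) (st.1.getD m 0)
      ∧ (entries.foldl pvEntryStep st).2.getD m false
        = (st.2.getD m false || !(entries.filterMap (fun e => pvGetMacro e m)).isEmpty) := by
  induction entries generalizing st with
  | nil => simp
  | cons e es ih =>
    obtain ⟨ih1, ih2⟩ := ih (pvEntryStep st e)
    constructor
    · rw [List.foldl_cons, ih1, pvEntryStep_totals st e m hm]
      cases h : pvGetMacro e m <;> simp [h]
    · rw [List.foldl_cons, ih2, pvEntryStep_has st e m hm]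
      cases h : pvGetMacro e m <;> simp [h]

def pvInit : PySem.Dict String Int × PySem.Dict String Bool :=
  (PySem.Dict.ofList [("protein", 0), ("fat", 0), ("carbs", 0)],
   PySem.Dict.ofList [("protein", false), ("fat", false), ("carbs", false)])

theorem pvComponentA (entries : List (List (String × Option Int))) (m : String)
    (hm : m = "protein" ∨ m = "fat" ∨ m = "carbs") :
    (if (entries.foldl pvEntryStep pvInit).2.getD m false
       then some ((entries.foldl pvEntryStep pvInit).1.getD m 0) else none)
    = pvSpecF entries m := by
  obtain ⟨h1, h2⟩ := pvFold_invariant entries pvInit m hm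
  rw [pvSpecF, h1, h2]
  have h0t : pvInit.1.getD m 0 = 0 := by
    rcases hm with rfl | rfl | rfl <;> decide
  have h0h : pvInit.2.getD m false = false := by
    rcases hm with rfl | rfl | rfl <;> decide
  rw [h0t, h0h]
  cases hv : entries.filterMap (fun e => pvGetMacro e m) <;> simp [List.isEmpty]

theorem pvA_eq_spec (entries : List (List (String × Option Int))) :
    calculate_macros_py entries
      = [("protein", pvSpecF entries "protein"), ("fat", pvSpecF entries "fat"),
         ("carbs", pvSpecF entries "carbs")] := by
  unfold calculate_macros_py
  simp only [List.map]
  rw [show (fun (st : PySem.Dict String Int × PySem.Dict String Bool) entry =>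
        ["protein", "fat", "carbs"].foldl (fun st m => pvStepA st entry m) st) = pvEntryStep from rfl,
      show (PySem.Dict.ofList [("protein", (0:Int)), ("fat", 0), ("carbs", 0)],
        PySem.Dict.ofList [("protein", false), ("fat", false), ("carbs", false)]) = pvInit from rfl,
      pvComponentA entries "protein" (Or.inl rfl),
      pvComponentA entries "fat" (Or.inr (Or.inl rfl)),
      pvComponentA entries "carbs" (Or.inr (Or.inr rfl))]

----------------------------------------------------------------- B-side lemmas

theorem pvOptAdd_none_left (b : Option Int) : pvOptAdd none b = b := by cases b <;> rfl

theorem pvOptAdd_none_right (a : Option Int) : pvOptAdd a none = a := by cases a <;> rfl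

theorem pvOptAdd_assoc (a b c : Option Int) :
    pvOptAdd (pvOptAdd a b) c = pvOptAdd a (pvOptAdd b c) := by
  cases a <;> cases b <;> cases c <;> simp [pvOptAdd, Int.add_assoc]

def pvId3 : Option Int × Option Int × Option Int := (none, none, none)

theorem pvMerge_id_left (x : Option Int × Option Int × Option Int) : pvMerge pvId3 x = x := by
  obtain ⟨a, b, c⟩ := x
  simp [pvMerge, pvId3, pvOptAdd_none_left]

theorem pvMerge_id_right (x : Option Int × Option Int × Option Int) : pvMerge x pvId3 = x := by
  obtain ⟨a, b, c⟩ := x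
  simp [pvMerge, pvId3, pvOptAdd_none_right]

theorem pvMerge_assoc (x y z : Option Int × Option Int × Option Int) :
    pvMerge (pvMerge x y) z = pvMerge x (pvMerge y z) := by
  simp [pvMerge, pvOptAdd_assoc]

-- left fold of merged triples over a segment
def pvG (l : List (List (String × Option Int))) : Option Int × Option Int × Option Int :=
  l.foldl (fun acc e => pvMerge acc (pvTriple e)) pvId3

theorem pvG_foldl (l : List (List (String × Option Int)))
    (acc : Option Int × Option Int × Option Int) :
    l.foldl (fun acc e => pvMerge acc (pvTriple e)) acc = pvMerge acc (pvG l) := by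
  induction l generalizing acc with
  | nil => simp only [List.foldl_nil, pvG]; exact (pvMerge_id_right acc).symm
  | cons e es ih =>
    have h : pvG (e :: es) = pvMerge (pvTriple e) (pvG es) := by
      rw [pvG, List.foldl_cons, pvMerge_id_left]; exact ih (pvTriple e)
    rw [List.foldl_cons, ih, h, ← pvMerge_assoc]

theorem pvG_append (l₁ l₂ : List (List (String × Option Int))) :
    pvG (l₁ ++ l₂) = pvMerge (pvG l₁) (pvG l₂) := by
  simp only [pvG, List.foldl_append]
  exact pvG_foldl l₂ _

-- pvReduce computes pvG of the segment [lo, hi)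
theorem pvReduce_eq_G (entries : List (List (String × Option Int))) (fuel lo hi : Nat)
    (hlt : lo < hi) (hfuel : hi - lo ≤ fuel) (hhi : hi ≤ entries.length) :
    pvReduce entries fuel lo hi = pvG ((entries.drop lo).take (hi - lo)) := by
  induction fuel generalizing lo hi with
  | zero => omega
  | succ fuel ih =>
    unfold pvReduce
    by_cases h1 : hi - lo = 1
    · simp only [h1, if_pos]
      have hlo : lo < entries.length := by omega
      have hd : entries.drop lo = entries[lo] :: entries.drop (lo + 1) :=
        List.drop_eq_getElem_cons hlo
      have htake : (entries.drop lo).take 1 = [entries[lo]] := by rw [hd]; rfl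
      have hget : entries.getD lo [] = entries[lo] := by
        simp [List.getD, List.getElem?_eq_getElem hlo]
      rw [htake, hget, pvG, List.foldl_cons, List.foldl_nil, pvMerge_id_left]
    · simp only [if_neg h1]
      have h2 : 2 ≤ hi - lo := by omega
      have hmid1 : lo < (lo + hi) / 2 := by omega
      have hmid2 : (lo + hi) / 2 < hi := by omega
      rw [ih lo ((lo + hi) / 2) hmid1 (by omega) (by omega),
          ih ((lo + hi) / 2) hi hmid2 (by omega) hhi]
      rw [← pvG_append]
      congr 1
      have hsplit : hi - lo = ((lo + hi) / 2 - lo) + (hi - (lo + hi) / 2) := by omega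
      rw [hsplit, List.take_add]
      congr 1
      rw [List.drop_drop]
      congr 2
      omega

-- fold of pvOptAdd over a list of options equals the if/filterMap form
theorem pvOptFold_some (l : List (Option Int)) (a : Int) :
    l.foldl pvOptAdd (some a) = some ((l.filterMap id).foldl (· + ·) a) := by
  induction l generalizing a with
  | nil => simp
  | cons o os ih => cases o <;> simp [pvOptAdd, ih]

theorem pvOptFold_none (l : List (Option Int)) :
    l.foldl pvOptAdd none
      = (if l.filterMap id = [] then none
         else some ((l.filterMap id).foldl (· + ·) 0)) := by
  induction l with
  | nil => simp
  | cons o os ih =>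
    cases o with
    | none => simpa [pvOptAdd] using ih
    | some v =>
      simp only [List.foldl_cons, pvOptAdd_none_left, pvOptFold_some os v,
        List.filterMap_cons, id]
      simp [Int.zero_add]

-- the three components of pvG, as folds over the per-macro option lists
theorem pvG_components (l : List (List (String × Option Int)))
    (acc : Option Int × Option Int × Option Int) :
    (l.foldl (fun acc e => pvMerge acc (pvTriple e)) acc).1
        = (l.map (fun e => pvGetMacro e "protein")).foldl pvOptAdd acc.1
      ∧ (l.foldl (fun acc e => pvMerge acc (pvTriple e)) acc).2.1
        = (l.map (fun e => pvGetMacro e "fat")).foldl pvOptAdd acc.2.1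
      ∧ (l.foldl (fun acc e => pvMerge acc (pvTriple e)) acc).2.2
        = (l.map (fun e => pvGetMacro e "carbs")).foldl pvOptAdd acc.2.2 := by
  induction l generalizing acc with
  | nil => simp
  | cons e es ih => simpa [pvMerge, pvTriple] using ih (pvMerge acc (pvTriple e))

theorem pvOptFold_map (l : List (List (String × Option Int))) (m : String) :
    (l.map (fun e => pvGetMacro e m)).foldl pvOptAdd none = pvSpecF l m := by
  rw [pvOptFold_none, pvSpecF]
  simp [List.filterMap_map]

theorem pvB_eq_spec (entries : List (List (String × Option Int))) :
    calculate_macros_py_alt entries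
      = [("protein", pvSpecF entries "protein"), ("fat", pvSpecF entries "fat"),
         ("carbs", pvSpecF entries "carbs")] := by
  unfold calculate_macros_py_alt
  cases entries with
  | nil => simp [pvSpecF]
  | cons e es =>
    have hne : (e :: es : List (List (String × Option Int))).isEmpty = false := rfl
    simp only [hne, Bool.false_eq_true, if_false]
    rw [pvReduce_eq_G (e :: es) (e :: es).length 0 (e :: es).length
        (by simp) (by omega) (le_refl _)]
    simp only [Nat.sub_zero, List.drop_zero, List.take_length]
    obtain ⟨h1, h2, h3⟩ := pvG_components (e :: es) pvId3
    rw [pvG, h1, h2, h3]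
    simp only [pvId3]
    rw [pvOptFold_map, pvOptFold_map, pvOptFold_map]

-- ===== VERDICT (by name: the statement is the Claim_ definition above) =====
theorem calculate_macros_py_spec : Claim_equal_calculate_macros_py := by
  intro entries _
  unfold Spec_calculate_macros_py
  rw [pvA_eq_spec, pvB_eq_spec]
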